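-- pv_equiv track=rewrite | github.com/dtkdt100/Image-to-Nonogram | main.py | generate_2D_list
-- ===== SOURCE A (Python) =====
-- def generate_2D_list(numerical_list):
--     """
--     Generates a 2 dimensional list of the count of the number 0 in numerical_list.
--     For example: numerical_list = [[1, 0, 0, 1], [0, 1, 0, 1]]
--     returns: [[2], [1, 1]]
--     """
--     count_list = []
--     for i in range(len(numerical_list)):
--         count_list.append([])
--         append_index = 0
--         for j in range(len(numerical_list[i])):
--             if numerical_list[i][j] == 0:
--                 if append_index >= len(count_list[i]):
--                     count_list[i].append(1)
--                 else:
--                     count_list[i][append_index] += 1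
--             else:
--                 if not append_index >= len(count_list[i]):
--                     append_index += 1
--
--     return count_list
-- ===== SOURCE B (Python) =====
-- def _count_runs(row):
--     runs = []
--     count = 0
--     for x in row:
--         if x == 0:
--             count += 1
--         else:
--             if count > 0:
--                 runs.append(count)
--             count = 0
--     if count > 0:
--         runs.append(count)
--     return runs
--
--
-- def generate_2D_list(numerical_list):
--     return [_count_runs(row) for row in numerical_list]
-- ===== Notes on version B (the rewrite author's own statement) =====
-- stated objective: simpler
-- what changed: Replaces A's mutate-the-output bookkeeping (append_index into the growing runs list, in-place increment of its last cell) with a plain scalar run counter that is flushed to the runs list when a run ends (and once after the loop), returned per row via a comprehension; avoiding per-element indexing/len calls also makes it measurably faster by a constant factor.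
import Mathlib
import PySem

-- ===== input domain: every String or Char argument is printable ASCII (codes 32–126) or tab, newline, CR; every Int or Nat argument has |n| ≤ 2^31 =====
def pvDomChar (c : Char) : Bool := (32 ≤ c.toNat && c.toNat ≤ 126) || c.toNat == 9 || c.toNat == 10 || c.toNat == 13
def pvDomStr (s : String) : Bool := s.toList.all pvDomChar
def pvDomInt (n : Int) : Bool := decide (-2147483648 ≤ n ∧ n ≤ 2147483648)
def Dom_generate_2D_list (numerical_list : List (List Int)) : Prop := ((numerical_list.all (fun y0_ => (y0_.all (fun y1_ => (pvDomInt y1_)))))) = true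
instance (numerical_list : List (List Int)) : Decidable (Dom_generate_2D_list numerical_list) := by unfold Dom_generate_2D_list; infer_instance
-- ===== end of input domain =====

-- B replaces A's append_index/in-place-increment bookkeeping with a scalar run counter flushed on run end: simpler.

-- ===== PORT A =====
-- helper for Python's `count_list[i][append_index] += 1` (increment at an index)
def pvIncAt : List Int → Nat → List Int
  | [], _ => []
  | a :: t, 0 => (a + 1) :: t
  | a :: t, n + 1 => a :: pvIncAt t n

-- inner loop of A over one row: state is (count_list[i], append_index)
def pvRowA : List Int → List Int → Nat → List Int
  | [], cl, _ => cl
  | x :: xs, cl, ai =>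
    if x == 0 then
      if ai ≥ cl.length then pvRowA xs (cl ++ [1]) ai
      else pvRowA xs (pvIncAt cl ai) ai
    else
      if ¬ ai ≥ cl.length then pvRowA xs cl (ai + 1)
      else pvRowA xs cl ai

def generate_2D_list (numerical_list : List (List Int)) : List (List Int) :=
  numerical_list.foldl (fun count_list row => count_list ++ [pvRowA row [] 0]) []

-- ===== PORT B =====
-- scalar counter, flushed when a run ends and once after the loop
def pvRowB : List Int → List Int → Int → List Int
  | [], runs, count => if count > 0 then runs ++ [count] else runs
  | x :: xs, runs, count =>
    if x == 0 then pvRowB xs runs (count + 1)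
    else if count > 0 then pvRowB xs (runs ++ [count]) 0
    else pvRowB xs runs 0

def generate_2D_list_alt (numerical_list : List (List Int)) : List (List Int) :=
  numerical_list.map (fun row => pvRowB row [] 0)

-- ===== PRECONDITION & SPEC =====
def Spec_generate_2D_list (numerical_list : List (List Int)) (out : List (List Int)) : Prop := out = generate_2D_list_alt numerical_list
instance (numerical_list : List (List Int)) (out : List (List Int)) : Decidable (Spec_generate_2D_list numerical_list out) := by unfold Spec_generate_2D_list; infer_instance

-- ===== CLAIM (what is proved, stated in full; the proofs are below) =====
def Claim_equal_generate_2D_list : Prop := ∀ (numerical_list : List (List Int)), Dom_generate_2D_list numerical_list → Spec_generate_2D_list numerical_list (generate_2D_list numerical_list)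

-- ===== LEMMAS AND PROOFS =====
theorem pvIncAt_append (runs : List Int) (c : Int) :
    pvIncAt (runs ++ [c]) runs.length = runs ++ [c + 1] := by
  induction runs with
  | nil => simp [pvIncAt]
  | cons a t ih => simp [pvIncAt, ih]

-- A's state is either "no open run" (append_index = length) or "open run of size c"
-- (last cell c, append_index = length - 1); both correspond to B's (runs, count).
theorem pvRow_eq (xs : List Int) : ∀ runs : List Int,
    pvRowA xs runs runs.length = pvRowB xs runs 0 ∧
    ∀ c : Int, 0 < c → pvRowA xs (runs ++ [c]) runs.length = pvRowB xs runs c := by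
  induction xs with
  | nil =>
    intro runs
    refine ⟨rfl, fun c hc => ?_⟩
    simp [pvRowA, pvRowB, hc]
  | cons x xs ih =>
    intro runs
    constructor
    · by_cases hx : x = 0
      · have h1 := (ih runs).2 1 (by norm_num)
        simp only [pvRowA, pvRowB, hx]
        simpa using h1
      · have h0 := (ih runs).1
        simp only [pvRowA, pvRowB]
        simp [hx, h0]
    · intro c hc
      by_cases hx : x = 0
      · have h1 := (ih runs).2 (c + 1) (by omega)
        simp only [pvRowA, pvRowB, hx]
        have hlen : ¬ runs.length ≥ (runs ++ [c]).length := by simp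
        simp only [beq_self_eq_true, if_true, if_neg hlen]
        rw [pvIncAt_append]
        exact h1
      · have h0 := (ih (runs ++ [c])).1
        have hlt : runs.length < (runs ++ [c]).length := by simp
        simp only [pvRowA, pvRowB, hx, beq_iff_eq, if_pos hc, not_le, ge_iff_le,
          if_pos hlt]
        have hlen : runs.length + 1 = (runs ++ [c]).length := by simp
        rw [hlen] at *
        simpa using h0

theorem foldl_append_map (l : List (List Int)) (a : List (List Int)) :
    l.foldl (fun acc row => acc ++ [pvRowA row [] 0]) a = a ++ l.map (fun row => pvRowA row [] 0) := by
  induction l generalizing a with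
  | nil => simp
  | cons r t ih => simp [List.foldl, ih]

-- ===== VERDICT (by name: the statement is the Claim_ definition above) =====
theorem generate_2D_list_spec : Claim_equal_generate_2D_list := by
  intro l _
  unfold Spec_generate_2D_list generate_2D_list generate_2D_list_alt
  rw [foldl_append_map]
  simp only [List.nil_append]
  apply List.map_congr_left
  intro row _
  exact (pvRow_eq row []).1
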